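-- pv_equiv track=rewrite | github.com/furkan-kalabalik/CSE321-Algorithms-HW | AlternatingBoxes.py | alternate_helper
-- ===== SOURCE A (Python) =====
-- def swap(liste, position1, position2):
--     temp = liste[position1]
--     liste[position1] = liste[position2]
--     liste[position2] = temp
--
-- def alternate_helper(liste, pos1, pos2):
--     list_len = pos2 - pos1 + 1
--     if(list_len == 2):
--         return liste
--     if (list_len == 4):
--         swap(liste, pos1+1, pos2-1)
--         return liste
--     swap(liste, pos1+1, pos2-1)
--     return alternate_helper(liste, pos1+2, pos2-2)
-- ===== SOURCE B (Python) =====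
-- def alternate_helper(liste, pos1, pos2):
--     # two pointers walking inward over the inner elements, swapping mirrored pairs
--     i, j = pos1 + 1, pos2 - 1
--     while True:
--         if j - i == -1:      # length-2 core: nothing to swap
--             return liste
--         liste[i], liste[j] = liste[j], liste[i]
--         if j - i == 1:       # the adjacent pair was the last swap
--             return liste
--         i += 2
--         j -= 2
-- ===== Notes on version B (the rewrite author's own statement) =====
-- stated objective: simpler
-- what changed: Replaces the shrinking-segment recursion with its length-2/length-4 base cases and swap helper by a single flat two-pointer loop that walks the mirrored inner indices i=pos1+1, j=pos2-1 inward, swapping in a tuple assignment until the pointers meet (gap -1) or cross after the last adjacent swap (gap 1).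
import Mathlib
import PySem

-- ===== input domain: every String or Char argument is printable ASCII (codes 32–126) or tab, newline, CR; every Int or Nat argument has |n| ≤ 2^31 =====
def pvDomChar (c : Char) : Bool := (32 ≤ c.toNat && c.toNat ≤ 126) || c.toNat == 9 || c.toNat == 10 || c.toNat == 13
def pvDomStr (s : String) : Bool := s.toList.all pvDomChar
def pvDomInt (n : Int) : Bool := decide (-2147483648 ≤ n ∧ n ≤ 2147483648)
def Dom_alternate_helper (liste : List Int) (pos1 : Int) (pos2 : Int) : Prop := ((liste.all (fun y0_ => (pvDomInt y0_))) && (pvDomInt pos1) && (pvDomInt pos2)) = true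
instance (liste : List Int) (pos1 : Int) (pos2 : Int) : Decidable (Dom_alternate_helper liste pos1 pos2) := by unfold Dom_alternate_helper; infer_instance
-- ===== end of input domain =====

-- B replaces A's shrinking-segment recursion (base cases on segment lengths 2 and 4, swap helper) by a
-- flat two-pointer loop walking the mirrored inner pair indices inward (objective: simpler).
-- Both Pythons mutate `liste` in place and return the same list object; the equivalence proved is about the return value.

-- ===== PORT A =====
-- A's swap helper: temp = liste[p1]; liste[p1] = liste[p2]; liste[p2] = temp
def pvSwapA (liste : List Int) (p1 : Int) (p2 : Int) : List Int :=
  match PySem.List.pyGet? liste p1, PySem.List.pyGet? liste p2 with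
  | some v1, some v2 => PySem.List.pySetD (PySem.List.pySetD liste p1 v2) p2 v1
  | _, _ => liste    -- Python raises IndexError here; such inputs are outside Pre_

def alternate_helper (liste : List Int) (pos1 : Int) (pos2 : Int) : List Int :=
  if pos2 - pos1 + 1 = 2 then liste
  else if pos2 - pos1 + 1 = 4 then pvSwapA liste (pos1 + 1) (pos2 - 1)
  else if pos2 - pos1 + 1 ≤ 0 then liste   -- guard: Python diverges (RecursionError/IndexError) here; outside Pre_
  else alternate_helper (pvSwapA liste (pos1 + 1) (pos2 - 1)) (pos1 + 2) (pos2 - 2)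
termination_by (pos2 - pos1 + 1).toNat
decreasing_by omega

-- ===== PORT B =====
-- B's loop: while True: if j-i == -1: return; tuple-swap liste[i], liste[j]; if j-i == 1: return; i += 2; j -= 2.
-- On an out-of-range index the Python raises IndexError (pyGet? = none): the loop stops there; outside Pre_.
def pvAltLoop (liste : List Int) (i : Int) (j : Int) : List Int :=
  if j - i = -1 then liste
  else
    match _hj : PySem.List.pyGet? liste j with
    | none => liste      -- IndexError in Python; outside Pre_
    | some vj =>
      match hi : PySem.List.pyGet? liste i with
      | none => liste    -- IndexError in Python; outside Pre_
      | some vi =>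
        let l' := PySem.List.pySetD (PySem.List.pySetD liste i vj) j vi
        if j - i = 1 then l'
        else pvAltLoop l' (i + 2) (j - 2)
termination_by ((liste.length : Int) - i).toNat
decreasing_by
  have hr : ¬ (PySem.List.pyGet? liste i = none) := by simp [hi]
  rw [PySem.List.pyGet?_eq_none_iff] at hr
  have hin : PySem.Raise.InRange liste.length i := not_not.mp hr
  unfold PySem.Raise.InRange at hin
  simp [PySem.List.length_pySetD]
  omega

def alternate_helper_alt (liste : List Int) (pos1 : Int) (pos2 : Int) : List Int :=
  pvAltLoop liste (pos1 + 1) (pos2 - 1)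

-- ===== PRECONDITION & SPEC =====
-- Pre_ is exactly the set of inputs on which Python A returns: the segment length L = pos2-pos1+1 must be
-- even and ≥ 2 (otherwise the recursion never reaches a base case: RecursionError/IndexError), and when
-- L ≥ 4 the swapped indices, all lying in [pos1+1, pos2-1], must be valid Python indices (else IndexError).
def Pre_alternate_helper (liste : List Int) (pos1 : Int) (pos2 : Int) : Prop :=
  (pos2 - pos1 + 1) % 2 = 0 ∧ 2 ≤ pos2 - pos1 + 1 ∧
  (pos2 - pos1 + 1 = 2 ∨ (-(liste.length : Int) ≤ pos1 + 1 ∧ pos2 - 1 < (liste.length : Int)))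
instance (liste : List Int) (pos1 : Int) (pos2 : Int) : Decidable (Pre_alternate_helper liste pos1 pos2) := by unfold Pre_alternate_helper; infer_instance

def pvWitness_alternate_helper : List Int × Int × Int := ([1, 2, 3, 4, 5, 6], 0, 5)

def Spec_alternate_helper (liste : List Int) (pos1 : Int) (pos2 : Int) (out : List Int) : Prop := out = alternate_helper_alt liste pos1 pos2
instance (liste : List Int) (pos1 : Int) (pos2 : Int) (out : List Int) : Decidable (Spec_alternate_helper liste pos1 pos2 out) := by unfold Spec_alternate_helper; infer_instance

-- ===== CLAIM (what is proved, stated in full; the proofs are below) =====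
def Claim_equal_alternate_helper : Prop := ∀ (liste : List Int) (pos1 : Int) (pos2 : Int), Dom_alternate_helper liste pos1 pos2 → Pre_alternate_helper liste pos1 pos2 → Spec_alternate_helper liste pos1 pos2 (alternate_helper liste pos1 pos2)

-- ===== LEMMAS AND PROOFS =====

theorem length_pvSwapA (l : List Int) (i j : Int) : (pvSwapA l i j).length = l.length := by
  unfold pvSwapA
  cases PySem.List.pyGet? l i <;> cases PySem.List.pyGet? l j <;>
    simp [PySem.List.length_pySetD]

-- under valid indices, one unrolling of B's loop is A's swap followed by the moved pointers
theorem pvAltLoop_step (liste : List Int) (i j : Int)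
    (hij : 2 ≤ j - i)
    (hi : PySem.Raise.InRange liste.length i) (hj : PySem.Raise.InRange liste.length j) :
    pvAltLoop liste i j = pvAltLoop (pvSwapA liste i j) (i + 2) (j - 2) := by
  rw [pvAltLoop, if_neg (by omega)]
  have hi' := (not_iff_not.mpr (PySem.List.pyGet?_eq_none_iff liste i)).mpr (not_not.mpr hi)
  have hj' := (not_iff_not.mpr (PySem.List.pyGet?_eq_none_iff liste j)).mpr (not_not.mpr hj)
  obtain ⟨vi, hvi⟩ := Option.ne_none_iff_exists'.mp hi'
  obtain ⟨vj, hvj⟩ := Option.ne_none_iff_exists'.mp hj'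
  rw [hvj, hvi]
  simp only [if_neg (show ¬ j - i = 1 by omega)]
  unfold pvSwapA
  rw [hvi, hvj]

-- under valid indices, an adjacent pair (j - i = 1) is exactly A's swap
theorem pvAltLoop_last (liste : List Int) (i j : Int) (hij : j - i = 1)
    (hi : PySem.Raise.InRange liste.length i) (hj : PySem.Raise.InRange liste.length j) :
    pvAltLoop liste i j = pvSwapA liste i j := by
  rw [pvAltLoop, if_neg (by omega)]
  have hi' := (not_iff_not.mpr (PySem.List.pyGet?_eq_none_iff liste i)).mpr (not_not.mpr hi)
  have hj' := (not_iff_not.mpr (PySem.List.pyGet?_eq_none_iff liste j)).mpr (not_not.mpr hj)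
  obtain ⟨vi, hvi⟩ := Option.ne_none_iff_exists'.mp hi'
  obtain ⟨vj, hvj⟩ := Option.ne_none_iff_exists'.mp hj'
  rw [hvj, hvi]
  simp only [if_pos hij]
  unfold pvSwapA
  rw [hvi, hvj]

theorem main_equiv (m : Nat) : ∀ (liste : List Int) (pos1 pos2 : Int),
    (pos2 - pos1 + 1).toNat = m → Pre_alternate_helper liste pos1 pos2 →
    alternate_helper liste pos1 pos2 = pvAltLoop liste (pos1 + 1) (pos2 - 1) := by
  induction m using Nat.strong_induction_on with
  | _ m ih =>
    intro liste pos1 pos2 hm ⟨hpar, hge, hidx⟩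
    by_cases h2 : pos2 - pos1 + 1 = 2
    · rw [alternate_helper, if_pos h2, pvAltLoop, if_pos (by omega)]
    · by_cases h4 : pos2 - pos1 + 1 = 4
      · rcases hidx with h | ⟨hl, hr⟩
        · omega
        · rw [alternate_helper, if_neg h2, if_pos h4]
          exact (pvAltLoop_last liste (pos1 + 1) (pos2 - 1) (by omega)
            ⟨by omega, by omega⟩ ⟨by omega, by omega⟩).symm
      · have h6 : 6 ≤ pos2 - pos1 + 1 := by omega
        rcases hidx with h | ⟨hl, hr⟩
        · omega
        · rw [alternate_helper, if_neg h2, if_neg h4, if_neg (by omega)]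
          rw [pvAltLoop_step liste (pos1 + 1) (pos2 - 1) (by omega)
            ⟨by omega, by omega⟩ ⟨by omega, by omega⟩]
          have hlen := length_pvSwapA liste (pos1 + 1) (pos2 - 1)
          have := ih ((pos2 - 2 - (pos1 + 2) + 1).toNat) (by omega)
            (pvSwapA liste (pos1 + 1) (pos2 - 1)) (pos1 + 2) (pos2 - 2) rfl
            ⟨by omega, by omega, ?_⟩
          · rw [this]
            congr 1 <;> ring
          · by_cases h2' : pos2 - 2 - (pos1 + 2) + 1 = 2
            · exact Or.inl h2'
            · exact Or.inr ⟨by rw [hlen]; omega, by rw [hlen]; omega⟩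

-- ===== VERDICT (by name: the statement is the Claim_ definition above) =====
theorem alternate_helper_spec : Claim_equal_alternate_helper := by
  intro liste pos1 pos2 _ hpre
  unfold Spec_alternate_helper alternate_helper_alt
  exact main_equiv ((pos2 - pos1 + 1).toNat) liste pos1 pos2 rfl hpre
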